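-- pv_equiv track=rewrite | github.com/newbiema/python-principles-challenges | Counting syllables.py | count
-- ===== SOURCE A (Python) =====
-- def count(s):
--     kata = []
--     jumlah = 0
--     for i in s :
--         kata.append(i)
--     x = kata.count('-')
--     if '-' in kata:
--         jumlah += x+1
--         return jumlah
--     else:
--         return 1
-- ===== SOURCE B (Python) =====
-- def count(s):
--     i = s.find('-')
--     if i == -1:
--         return 1
--     return 1 + count(s[i+1:])
-- ===== Notes on version B (the rewrite author's own statement) =====
-- stated objective: alternative
-- what changed: B is recursive: it locates the first hyphen with str.find and recurses on the suffix after it, returning 1 on a hyphen-free string, instead of A's copy-all-chars-into-a-list, list.count and membership branch.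
import Mathlib
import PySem

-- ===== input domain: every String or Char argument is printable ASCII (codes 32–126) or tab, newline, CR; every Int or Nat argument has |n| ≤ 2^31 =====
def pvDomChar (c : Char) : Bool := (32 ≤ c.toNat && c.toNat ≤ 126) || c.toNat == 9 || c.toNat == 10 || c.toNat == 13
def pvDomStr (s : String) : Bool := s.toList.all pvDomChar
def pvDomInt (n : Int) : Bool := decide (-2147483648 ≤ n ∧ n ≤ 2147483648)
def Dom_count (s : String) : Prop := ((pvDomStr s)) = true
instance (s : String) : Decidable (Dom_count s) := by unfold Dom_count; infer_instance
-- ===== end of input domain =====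

-- B recursively finds the first hyphen with str.find and recurses on the suffix after it,
-- instead of A's copy-chars-into-a-list, count and branch (objective: alternative decomposition).


-- ===== PORT A =====
def count (s : String) : Int :=
  -- kata = []; for i in s: kata.append(i)
  let kata : List Char := s.toList.foldl (fun acc i => acc ++ [i]) []
  -- jumlah = 0
  let jumlah : Int := 0
  -- x = kata.count('-')
  let x : Int := (PySem.List.count kata '-' : Int)
  if '-' ∈ kata then jumlah + (x + 1) else 1

-- ===== PORT B =====
-- i = s.find('-'); if i == -1: return 1; return 1 + count(s[i+1:])
def countAltGo (l : List Char) : Int :=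
  let i := PySem.Chars.find l ['-']
  if i = -1 then 1
  else 1 + countAltGo (PySem.List.slice l (some (i + 1)) none)
termination_by l.length
decreasing_by
  have hnn : 0 ≤ PySem.Chars.find l ['-'] := by
    have := PySem.Chars.neg_one_le_find l ['-']
    omega
  have hin : (['-'] : List Char) <:+: l :=
    (PySem.Chars.find_ne_neg_one_iff l ['-']).1 (by assumption)
  have hlen : 0 < l.length := by
    rcases hin with ⟨t, u, h⟩
    subst h; simp
  rw [PySem.List.slice_from _ (by omega : (0:Int) ≤ PySem.Chars.find l ['-'] + 1)]
  have h1 : 1 ≤ ((PySem.Chars.find l ['-']) + 1).toNat := by omega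
  simp only [List.length_drop]
  omega

def count_alt (s : String) : Int := countAltGo s.toList

-- ===== PRECONDITION & SPEC =====
def Spec_count (s : String) (out : Int) : Prop := out = count_alt s
instance (s : String) (out : Int) : Decidable (Spec_count s out) := by unfold Spec_count; infer_instance

-- ===== CLAIM (what is proved, stated in full; the proofs are below) =====
def Claim_equal_count : Prop := ∀ (s : String), Dom_count s → Spec_count s (count s)

-- ===== LEMMAS AND PROOFS =====

-- A singleton is an infix iff its element is a member.
theorem singleton_infix_iff_mem (c : Char) (l : List Char) : ([c] <:+: l) ↔ c ∈ l := by
  constructor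
  · rintro ⟨t, u, rfl⟩; simp
  · intro h
    rcases List.append_of_mem h with ⟨t, u, rfl⟩
    exact ⟨t, u, by simp⟩

-- The recursion computes 1 + (number of hyphens in l).
theorem countAltGo_eq (l : List Char) : countAltGo l = 1 + (List.count '-' l : Int) := by
  induction l using countAltGo.induct with
  | case1 l i hi =>
    rw [countAltGo]
    rw [if_pos hi]
    have : ¬ (['-'] : List Char) <:+: l := (PySem.Chars.find_eq_neg_one_iff l ['-']).1 (by exact hi)
    have hmem : '-' ∉ l := fun h => this ((singleton_infix_iff_mem '-' l).2 h)
    simp [List.count_eq_zero_of_not_mem hmem]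
  | case2 l i hi ih =>
    rw [countAltGo]
    rw [if_neg hi]
    have hnn : 0 ≤ PySem.Chars.find l ['-'] := by
      have := PySem.Chars.neg_one_le_find l ['-']
      omega
    obtain ⟨hpre, hmin⟩ := PySem.Chars.find_spec (s := l) (sub := ['-']) hnn
    set k := (PySem.Chars.find l ['-']).toNat with hk
    -- drop k = '-' :: drop (k+1)
    have hklt : k < l.length := by
      rcases hpre with ⟨u, hu⟩
      have := congrArg List.length hu
      simp at this
      omega
    have hdropk : l.drop k = '-' :: l.drop (k + 1) := by
      rcases hpre with ⟨u, hu⟩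
      rw [← hu]
      have : l.drop (k + 1) = (l.drop k).drop 1 := by
        rw [List.drop_drop]
      rw [this, ← hu]
      rfl
    -- take k has no hyphen
    have htake : '-' ∉ l.take k := by
      intro hm
      rcases List.mem_iff_getElem.1 hm with ⟨j, hj, hget⟩
      have hjk : j < k := by simp at hj; omega
      apply hmin j hjk
      have : l.drop j = l[j] :: l.drop (j + 1) := List.drop_eq_getElem_cons (by omega)
      rw [this]
      have : l[j] = '-' := by
        have := hget
        simpa [List.getElem_take] using this
      rw [this]
      exact ⟨l.drop (j + 1), rfl⟩
    have hslice : PySem.List.slice l (some (PySem.Chars.find l ['-'] + 1)) none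
        = l.drop (k + 1) := by
      rw [PySem.List.slice_from _ (by omega : (0:Int) ≤ PySem.Chars.find l ['-'] + 1)]
      congr 1
      omega
    rw [hslice] at ih
    rw [hslice, ih]
    have hcount : List.count '-' l = List.count '-' (l.drop (k + 1)) + 1 := by
      conv_lhs => rw [← List.take_append_drop k l]
      rw [List.count_append, hdropk]
      simp [List.count_eq_zero_of_not_mem htake]
    rw [hcount]
    push_cast
    ring

-- ===== VERDICT (by name: the statement is the Claim_ definition above) =====
theorem count_spec : Claim_equal_count := by
  intro s _
  unfold Spec_count count count_alt
  rw [PySem.List.foldl_append_singleton, countAltGo_eq]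
  by_cases hm : '-' ∈ s.toList
  · simp [PySem.List.count, hm]
    ring
  · simp [hm, List.count_eq_zero_of_not_mem hm]
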